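-- pv_equiv track=rewrite | github.com/alexboutov/NinjaTrader4Niki | AnalyzeMarketReplaySessionVPS.py | analyze_indicator_at_signals
-- ===== SOURCE A (Python) =====
-- from collections import defaultdict
--
-- def analyze_indicator_at_signals(signals):
--     """Analyze indicator states at signal times."""
--     indicator_stats = defaultdict(lambda: {'up_count': 0, 'dn_count': 0})
--
--     for sig in signals:
--         for ind, state in sig.get('indicators', {}).items():
--             if state == 'UP':
--                 indicator_stats[ind]['up_count'] += 1
--             elif state == 'DN':
--                 indicator_stats[ind]['dn_count'] += 1
--
--     return dict(indicator_stats)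
-- ===== SOURCE B (Python) =====
-- def analyze_indicator_at_signals(signals):
--     """Analyze indicator states at signal times."""
--     events = [(ind, state)
--               for sig in signals
--               for ind, state in sig.get('indicators', {}).items()
--               if state in ('UP', 'DN')]
--     order = []
--     for ind, _ in events:
--         if ind not in order:
--             order.append(ind)
--     return {ind: {'up_count': events.count((ind, 'UP')),
--                   'dn_count': events.count((ind, 'DN'))}
--             for ind in order}
-- ===== Notes on version B (the rewrite author's own statement) =====
-- stated objective: alternative
-- what changed: A accumulates nested per-indicator dicts in place inside a double loop over signals via a defaultdict; B first flattens all indicator items into one filtered (ind, state) event list, dedups the indicator names in first-occurrence order, and then builds the result by counting each (ind, 'UP') / (ind, 'DN') pair in the flat event list.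
import Mathlib
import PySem

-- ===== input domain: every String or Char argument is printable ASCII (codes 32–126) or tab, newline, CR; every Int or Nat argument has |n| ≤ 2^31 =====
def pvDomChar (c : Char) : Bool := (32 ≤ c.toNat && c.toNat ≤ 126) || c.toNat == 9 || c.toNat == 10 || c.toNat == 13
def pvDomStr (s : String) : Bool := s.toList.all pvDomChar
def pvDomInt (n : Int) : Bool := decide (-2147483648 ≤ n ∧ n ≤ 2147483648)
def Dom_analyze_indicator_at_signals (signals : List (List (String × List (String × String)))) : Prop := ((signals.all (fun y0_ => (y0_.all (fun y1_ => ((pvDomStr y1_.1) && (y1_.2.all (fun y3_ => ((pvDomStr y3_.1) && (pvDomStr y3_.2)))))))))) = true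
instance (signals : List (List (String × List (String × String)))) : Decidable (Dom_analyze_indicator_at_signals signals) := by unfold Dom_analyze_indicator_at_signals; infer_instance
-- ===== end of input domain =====

-- B replaces A's in-place nested defaultdict accumulation by a flatten-filter pass, an ordered
-- dedup of indicator names, and per-indicator counting over the flat event list (objective: alternative).

-- ===== PORT A =====
-- the defaultdict's default factory: {'up_count': 0, 'dn_count': 0}
def pvDefaultStats : PySem.Dict String Int := PySem.Dict.mk [("up_count", 0), ("dn_count", 0)]

-- the body of A's inner loop: one (ind, state) item updates indicator_stats
def pvStepA (stats : PySem.Dict String (PySem.Dict String Int)) (p : String × String) :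
    PySem.Dict String (PySem.Dict String Int) :=
  if p.2 = "UP" then
    stats.insert p.1 ((stats.getD p.1 pvDefaultStats).modify "up_count" 0 (· + 1))
  else if p.2 = "DN" then
    stats.insert p.1 ((stats.getD p.1 pvDefaultStats).modify "dn_count" 0 (· + 1))
  else stats

def analyze_indicator_at_signals (signals : List (List (String × List (String × String)))) : List (String × List (String × Int)) :=
  let indicator_stats : PySem.Dict String (PySem.Dict String Int) :=
    signals.foldl
      (fun stats sig => ((PySem.Dict.mk sig).getD "indicators" []).foldl pvStepA stats)
      PySem.Dict.empty
  indicator_stats.items.map (fun q => (q.1, q.2.items))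

-- ===== PORT B =====
def analyze_indicator_at_signals_alt (signals : List (List (String × List (String × String)))) : List (String × List (String × Int)) :=
  let events : List (String × String) :=
    signals.flatMap
      (fun sig => ((PySem.Dict.mk sig).getD "indicators" []).filter
        (fun p => p.2 == "UP" || p.2 == "DN"))
  let order : List String :=
    events.foldl (fun order p => if p.1 ∈ order then order else order ++ [p.1]) []
  order.map (fun ind =>
    (ind, [("up_count", (events.count (ind, "UP") : Int)),
           ("dn_count", (events.count (ind, "DN") : Int))]))

-- ===== PRECONDITION & SPEC =====
def Spec_analyze_indicator_at_signals (signals : List (List (String × List (String × String)))) (out : List (String × List (String × Int))) : Prop := out = analyze_indicator_at_signals_alt signals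
instance (signals : List (List (String × List (String × String)))) (out : List (String × List (String × Int))) : Decidable (Spec_analyze_indicator_at_signals signals out) := by unfold Spec_analyze_indicator_at_signals; infer_instance

-- ===== CLAIM (what is proved, stated in full; the proofs are below) =====
def Claim_equal_analyze_indicator_at_signals : Prop := ∀ (signals : List (List (String × List (String × String)))), Dom_analyze_indicator_at_signals signals → Spec_analyze_indicator_at_signals signals (analyze_indicator_at_signals signals)

-- ===== LEMMAS AND PROOFS =====

-- the filter B applies to one (ind, state) item
def pvPass (p : String × String) : Bool := p.2 == "UP" || p.2 == "DN"

-- B's dedup loop, as a function of the event list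
def pvOrder (es : List (String × String)) : List String :=
  es.foldl (fun order p => if p.1 ∈ order then order else order ++ [p.1]) []

-- the common characterisation both ports are reduced to
def pvShape (es : List (String × String)) : PySem.Dict String (PySem.Dict String Int) :=
  PySem.Dict.mk ((pvOrder es).map (fun ind =>
    (ind, PySem.Dict.mk [("up_count", (es.count (ind, "UP") : Int)),
                         ("dn_count", (es.count (ind, "DN") : Int))])))

theorem pvOrder_append_singleton (es : List (String × String)) (e : String × String) :
    pvOrder (es ++ [e]) = if e.1 ∈ pvOrder es then pvOrder es else pvOrder es ++ [e.1] := by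
  simp [pvOrder, List.foldl_append]

theorem pvOrder_aux_mem (es : List (String × String)) (acc : List String) (x : String) :
    x ∈ es.foldl (fun order p => if p.1 ∈ order then order else order ++ [p.1]) acc ↔
      x ∈ acc ∨ x ∈ es.map Prod.fst := by
  induction es generalizing acc with
  | nil => simp
  | cons e es ih =>
    simp only [List.foldl_cons, ih, List.map_cons, List.mem_cons]
    split_ifs with h
    · constructor
      · rintro (h1 | h2) <;> tauto
      · rintro (h1 | h2 | h3)
        · tauto
        · subst h2; exact Or.inl h
        · tauto
    · simp only [List.mem_append, List.mem_singleton]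
      tauto

theorem pvOrder_mem (es : List (String × String)) (x : String) :
    x ∈ pvOrder es ↔ x ∈ es.map Prod.fst := by
  simpa using pvOrder_aux_mem es [] x

theorem pvOrder_aux_nodup (es : List (String × String)) (acc : List String) (h : acc.Nodup) :
    (es.foldl (fun order p => if p.1 ∈ order then order else order ++ [p.1]) acc).Nodup := by
  induction es generalizing acc with
  | nil => exact h
  | cons e es ih =>
    simp only [List.foldl_cons]
    split_ifs with hm
    · exact ih acc h
    · refine ih _ ?_
      simp only [List.nodup_append, List.nodup_singleton]
      refine ⟨h, trivial, fun a ha b hb => ?_⟩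
      simp only [List.mem_singleton] at hb
      subst hb
      rintro rfl
      exact hm ha

theorem pvOrder_nodup (es : List (String × String)) : (pvOrder es).Nodup :=
  pvOrder_aux_nodup es [] List.nodup_nil

theorem pvShape_keys (es : List (String × String)) :
    (pvShape es).keys = pvOrder es := by
  simp only [pvShape, PySem.Dict.keys, List.map_map]
  exact List.map_id' _

theorem pvShape_getD (es : List (String × String)) (i : String) (hi : i ∈ pvOrder es) :
    (pvShape es).getD i pvDefaultStats =
      PySem.Dict.mk [("up_count", (es.count (i, "UP") : Int)),
                     ("dn_count", (es.count (i, "DN") : Int))] := by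
  apply PySem.Dict.getD_of_mem_items
  · simp only [pvShape]
    exact List.mem_map.mpr ⟨i, hi, rfl⟩
  · rw [pvShape_keys]; exact pvOrder_nodup es

-- count of a pair whose first component never occurs is 0
theorem pvCount_zero (es : List (String × String)) (i : String) (s : String)
    (h : i ∉ es.map Prod.fst) : es.count (i, s) = 0 := by
  rw [List.count_eq_zero]
  intro hmem
  exact h (List.mem_map.mpr ⟨(i, s), hmem, rfl⟩)

-- one UP/DN event advances pvShape exactly as A's step does
theorem pvCount_app_ne (es : List (String × String)) (e q : String × String) (h : q ≠ e) :
    (es ++ [e]).count q = es.count q := by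
  simp [List.count_append, Ne.symm h]

theorem pvStep_shape (es : List (String × String)) (i st : String)
    (hst : st = "UP" ∨ st = "DN") :
    pvStepA (pvShape es) (i, st) = pvShape (es ++ [(i, st)]) := by
  by_cases hmem : i ∈ pvOrder es
  · have hc : (pvShape es).contains i = true := by
      rw [PySem.Dict.contains_iff_mem_keys, pvShape_keys]; exact hmem
    have horder : pvOrder (es ++ [(i, st)]) = pvOrder es := by
      rw [pvOrder_append_singleton]; simp [hmem]
    apply PySem.Dict.ext
    rcases hst with hst | hst <;> subst hst <;>
    · rw [pvStepA]
      simp only [reduceIte, String.reduceEq, pvShape_getD es i hmem]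
      rw [PySem.Dict.items_insert_of_contains _ _ hc]
      simp only [pvShape, horder, List.map_map]
      apply List.map_congr_left
      intro a ha
      by_cases hai : a = i
      · subst hai
        simp [Function.comp, PySem.Dict.modify, PySem.Dict.getD, PySem.Dict.get?,
          PySem.Dict.insert, PySem.Dict.contains, List.count_append]
      · have hb : (a == i) = false := by simp [hai]
        have h1 : (a, "UP") ≠ (i, "UP") := by simp [hai]
        have h2 : (a, "DN") ≠ (i, "DN") := by simp [hai]
        have h3 : (a, "UP") ≠ (i, "DN") := by simp [hai]
        have h4 : (a, "DN") ≠ (i, "UP") := by simp [hai]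
        simp only [Function.comp, pvCount_app_ne es (i, "UP") (a, "UP") h1,
          pvCount_app_ne es (i, "UP") (a, "DN") h4, pvCount_app_ne es (i, "DN") (a, "DN") h2,
          pvCount_app_ne es (i, "DN") (a, "UP") h3]
        simp [hb]
  · have hc : (pvShape es).contains i = false := by
      rw [Bool.eq_false_iff]
      intro hcon
      rw [PySem.Dict.contains_iff_mem_keys, pvShape_keys] at hcon
      exact hmem hcon
    have horder : pvOrder (es ++ [(i, st)]) = pvOrder es ++ [i] := by
      rw [pvOrder_append_singleton]; simp [hmem]
    have hfst : i ∉ es.map Prod.fst := fun hmm => hmem ((pvOrder_mem es i).mpr hmm)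
    have hgd : (pvShape es).getD i pvDefaultStats = pvDefaultStats :=
      PySem.Dict.getD_of_not_contains _ _ hc
    apply PySem.Dict.ext
    rcases hst with hst | hst <;> subst hst <;>
    · rw [pvStepA]
      simp only [reduceIte, String.reduceEq, hgd]
      rw [PySem.Dict.items_insert_of_not_contains _ _ hc]
      simp only [pvShape, horder, List.map_append, List.map_cons, List.map_nil]
      congr 1
      · apply List.map_congr_left
        intro a ha
        have hai : a ≠ i := fun hh => hmem (hh ▸ ha)
        have h1 : (a, "UP") ≠ (i, "UP") := by simp [hai]
        have h2 : (a, "DN") ≠ (i, "DN") := by simp [hai]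
        have h3 : (a, "UP") ≠ (i, "DN") := by simp [hai]
        have h4 : (a, "DN") ≠ (i, "UP") := by simp [hai]
        simp only [pvCount_app_ne es (i, "UP") (a, "UP") h1,
          pvCount_app_ne es (i, "UP") (a, "DN") h4, pvCount_app_ne es (i, "DN") (a, "DN") h2,
          pvCount_app_ne es (i, "DN") (a, "UP") h3]
      · simp [pvDefaultStats, PySem.Dict.modify, PySem.Dict.getD, PySem.Dict.get?,
          PySem.Dict.insert, PySem.Dict.contains, List.count_append,
          pvCount_zero es i _ hfst]

-- the main invariant: A's accumulation over a filtered event list is pvShape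
theorem pvMain (es : List (String × String)) (h : ∀ p ∈ es, pvPass p) :
    es.foldl pvStepA PySem.Dict.empty = pvShape es := by
  induction es using List.reverseRecOn with
  | nil => simp [pvShape, pvOrder, PySem.Dict.empty]
  | append_singleton es e ih =>
    have hes : ∀ p ∈ es, pvPass p := fun p hp => h p (by simp [hp])
    have he : pvPass e := h e (by simp)
    obtain ⟨i, st⟩ := e
    have hst : st = "UP" ∨ st = "DN" := by simpa [pvPass] using he
    rw [List.foldl_append, List.foldl_cons, List.foldl_nil, ih hes, pvStep_shape es i st hst]

-- folding A's step over any item list equals folding it over the pvPass-filtered list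
theorem pvFoldl_filter (es : List (String × String))
    (d : PySem.Dict String (PySem.Dict String Int)) :
    es.foldl pvStepA d = (es.filter pvPass).foldl pvStepA d := by
  induction es generalizing d with
  | nil => rfl
  | cons e es ih =>
    by_cases hp : pvPass e
    · simp [hp, List.foldl_cons, ih]
    · have h1 : ¬ e.2 = "UP" := by
        intro hh; exact hp (by simp [pvPass, hh])
      have h2 : ¬ e.2 = "DN" := by
        intro hh; exact hp (by simp [pvPass, hh])
      simp [hp, List.foldl_cons, pvStepA, h1, h2, ih]

-- ===== VERDICT (by name: the statement is the Claim_ definition above) =====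
theorem analyze_indicator_at_signals_spec : Claim_equal_analyze_indicator_at_signals := by
  intro signals _
  unfold Spec_analyze_indicator_at_signals
  unfold analyze_indicator_at_signals analyze_indicator_at_signals_alt
  rw [← List.foldl_flatMap]
  rw [pvFoldl_filter, List.filter_flatMap]
  have hflt : ∀ p ∈ (signals.flatMap
      (fun sig => ((PySem.Dict.mk sig).getD "indicators" []).filter pvPass)), pvPass p := by
    intro p hp
    simp only [List.mem_flatMap, List.mem_filter] at hp
    obtain ⟨sig, _, _, hpass⟩ := hp
    exact hpass
  rw [show (fun p : String × String => p.2 == "UP" || p.2 == "DN") = pvPass from rfl]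
  rw [pvMain _ hflt]
  simp only [pvShape, List.map_map]
  rfl
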